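-- pv_equiv track=rewrite | github.com/fishsauce-05/PythonInPTIT | PY01024.py | solve
-- ===== SOURCE A (Python) =====
-- def solve(n):
-- 	cur = n%10
-- 	n //= 10
-- 	sumN = cur
-- 	while n:
-- 		tmp = n%10
-- 		if abs(tmp-cur) != 2:
-- 			return 'NO'
-- 		cur = tmp
-- 		sumN += cur
-- 		n //= 10
-- 	return 'YES' if sumN % 10 == 0 else 'NO'
-- ===== SOURCE B (Python) =====
-- def solve(n):
--     cur = n % 10
--     digits = [cur]
--     n //= 10
--     while n:
--         digits.append(n % 10)
--         n //= 10
--     if all(abs(a - b) == 2 for a, b in zip(digits, digits[1:])) and sum(digits) % 10 == 0: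
--         return 'YES'
--     return 'NO'
-- ===== Notes on version B (the rewrite author's own statement) =====
-- stated objective: simpler
-- what changed: A interleaves the adjacent-difference check and the running digit sum inside one extraction loop with an early return; B materializes the digit list once and then applies two separate whole-list checks (pairwise zip/all and sum).
-- outside the precondition, e.g. on solve(-1): A returns 'NO', B does not finish within the time limit; on solve(-46): A returns 'NO', B does not finish within the time limit
import Mathlib
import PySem

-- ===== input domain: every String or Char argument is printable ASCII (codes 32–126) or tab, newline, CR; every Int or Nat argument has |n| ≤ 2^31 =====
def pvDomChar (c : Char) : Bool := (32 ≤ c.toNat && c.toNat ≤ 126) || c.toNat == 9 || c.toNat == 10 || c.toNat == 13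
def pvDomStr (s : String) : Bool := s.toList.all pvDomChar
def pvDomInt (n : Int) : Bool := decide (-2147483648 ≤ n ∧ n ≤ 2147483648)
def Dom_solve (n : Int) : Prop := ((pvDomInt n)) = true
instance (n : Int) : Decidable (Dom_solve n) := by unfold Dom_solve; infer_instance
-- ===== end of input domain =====

-- B keeps A's digit extraction but is decomposed: materialize the digit list once, then two
-- separate whole-list checks (pairwise zip/all, sum) instead of A's interleaved loop with early return.

-- ===== PORT A =====
-- A's while-loop, fuel-guarded for totality only: with fuel 64 the guard is never reached on
-- Dom_solve ∩ Pre_solve (a nonnegative n ≤ 2^31 reaches 0 within 11 divisions by 10).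
def solveLoop (fuel : Nat) (cur sumN n : Int) : String :=
  if n = 0 then (if PySem.Int.mod sumN 10 = 0 then "YES" else "NO")
  else match fuel with
  | 0 => "NO"  -- fuel guard, unreachable on the claimed inputs
  | fuel + 1 =>
    let tmp := PySem.Int.mod n 10
    if (tmp - cur).natAbs ≠ 2 then "NO"
    else solveLoop fuel tmp (sumN + tmp) (PySem.Int.floordiv n 10)

def solve (n : Int) : String :=
  let cur := PySem.Int.mod n 10
  solveLoop 64 cur cur (PySem.Int.floordiv n 10)

-- ===== PORT B =====
-- the digits appended by Source B's 'while n:' loop, fuel-guarded for totality only (cf. solveLoop)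
def digitsRest (fuel : Nat) (n : Int) : List Int :=
  if n = 0 then []
  else match fuel with
  | 0 => []  -- fuel guard, unreachable on the claimed inputs
  | fuel + 1 => PySem.Int.mod n 10 :: digitsRest fuel (PySem.Int.floordiv n 10)

-- all(abs(a - b) == 2 for a, b in zip(digits, digits[1:]))
def adjOk (l : List Int) : Bool := (l.zip l.tail).all (fun p => (p.1 - p.2).natAbs == 2)

def solve_alt (n : Int) : String :=
  let digits := PySem.Int.mod n 10 :: digitsRest 64 (PySem.Int.floordiv n 10)
  if adjOk digits && (PySem.Int.mod digits.sum 10 == 0) then "YES" else "NO"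

-- ===== PRECONDITION & SPEC =====
-- Pre_ excludes negative n, on which A returns 'NO' only via the Python floor-division quirk that
-- n //= 10 never reaches 0; B's natural digit materialization diverges there.
def Pre_solve (n : Int) : Prop := 0 ≤ n
instance (n : Int) : Decidable (Pre_solve n) := by unfold Pre_solve; infer_instance
def pvWitness_solve : Int := (13)
def Spec_solve (n : Int) (out : String) : Prop := out = solve_alt n
instance (n : Int) (out : String) : Decidable (Spec_solve n out) := by unfold Spec_solve; infer_instance

-- ===== CLAIM (what is proved, stated in full; the proofs are below) =====
def Claim_equal_solve : Prop := ∀ (n : Int), Dom_solve n → Pre_solve n → Spec_solve n (solve n)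

-- ===== LEMMAS AND PROOFS =====

-- A's loop computes exactly B's two checks over cur :: (the materialized remaining digits)
theorem loop_char (fuel : Nat) : ∀ (n cur sumN : Int), 0 ≤ n → n < 10 ^ fuel →
    solveLoop fuel cur sumN n =
      (if adjOk (cur :: digitsRest fuel n) &&
          (PySem.Int.mod (sumN + (digitsRest fuel n).sum) 10 == 0) then "YES" else "NO") := by
  induction fuel with
  | zero =>
    intro n cur sumN h0 hlt
    have hn : n = 0 := by omega
    subst hn
    simp [solveLoop, digitsRest, adjOk]
  | succ f ih =>
    intro n cur sumN h0 hlt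
    by_cases hn : n = 0
    · subst hn
      simp [solveLoop, digitsRest, adjOk]
    · have hpos : 0 < n := lt_of_le_of_ne h0 (Ne.symm hn)
      rw [solveLoop, digitsRest]
      simp only [hn, if_false]
      rw [PySem.Int.floordiv_eq_ediv_of_pos (by omega : (0:Int) < 10),
          PySem.Int.mod_eq_emod_of_pos (by omega : (0:Int) < 10)]
      have h0' : 0 ≤ n / 10 := by omega
      have hlt' : n / 10 < 10 ^ f := by
        have h10 : (10:Int) ^ (f + 1) = 10 ^ f * 10 := by ring
        rw [h10] at hlt
        omega
      by_cases hne : (n % 10 - cur).natAbs ≠ 2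
      · rw [if_pos hne]
        simp only [adjOk, List.zip, List.tail, List.zipWith_cons_cons, List.all_cons]
        simp
        intro h _
        exfalso
        omega
      · have hsym : ((cur - n % 10).natAbs == 2) = true := by
          simp only [beq_iff_eq]
          omega
        rw [if_neg hne]
        rw [ih (n / 10) (n % 10) (sumN + n % 10) h0' hlt']
        have hmod : PySem.Int.mod (sumN + (n % 10 + (digitsRest f (n / 10)).sum)) 10
            = (sumN + n % 10 + (digitsRest f (n / 10)).sum) % 10 := by
          rw [PySem.Int.mod_eq_emod_of_pos (by omega : (0:Int) < 10)]
          ring_nf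
        simp only [adjOk, List.zip, List.tail, List.zipWith_cons_cons, List.all_cons, hsym,
          Bool.true_and, List.sum_cons, hmod,
          PySem.Int.mod_eq_emod_of_pos (by omega : (0:Int) < 10)]

-- ===== VERDICT (by name: the statement is the Claim_ definition above) =====
theorem solve_spec : Claim_equal_solve := by
  intro n hdom hpre
  unfold Spec_solve solve solve_alt
  have hdom' : n ≤ 2147483648 := by
    have := of_decide_eq_true hdom
    exact this.2
  have hpre' : (0:Int) ≤ n := hpre
  have h0 : (0:Int) ≤ PySem.Int.floordiv n 10 := by
    rw [PySem.Int.floordiv_eq_ediv_of_pos (by omega : (0:Int) < 10)]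
    omega
  have hlt : PySem.Int.floordiv n 10 < 10 ^ 64 := by
    rw [PySem.Int.floordiv_eq_ediv_of_pos (by omega : (0:Int) < 10)]
    have : n / 10 ≤ n := by omega
    calc n / 10 ≤ n := this
      _ ≤ 2147483648 := hdom'
      _ < 10 ^ 64 := by norm_num
  rw [loop_char 64 (PySem.Int.floordiv n 10) (PySem.Int.mod n 10) (PySem.Int.mod n 10) h0 hlt]
  simp [List.sum_cons]
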